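-- pv_equiv track=rewrite | github.com/chhawinder/stylesense | server/app/services/ensemble_service.py | _distribute_products
-- ===== SOURCE A (Python) =====
-- def _distribute_products(products: list, queries: list) -> list:
--     """Distribute a flat product list back into groups matching the query order."""
--     groups = [[] for _ in queries]
--
--     # Phase 1: match by search_query tag (exact match from scraper)
--     unmatched = []
--     for product in products:
--         pq = (product.get("search_query", "") or "").lower().strip()
--         placed = False
--         if pq:
--             for qi, q in enumerate(queries):
--                 qq = q.get("query", "").lower().strip()
--                 if pq == qq:
--                     groups[qi].append(product)
--                     placed = True
--                     break
--         if not placed: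
--             unmatched.append(product)
--
--     # Phase 2: match remaining by category + title keyword scoring
--     for product in unmatched:
--         p_cat = (product.get("category", "") or "").lower()
--         title = (product.get("title", "") or "").lower()
--         best_match = 0
--         best_score = -1
--         for qi, q in enumerate(queries):
--             q_cat = q.get("category", "").lower()
--             words = q.get("query", "").lower().split()
--             score = sum(1 for w in words if w in title)
--             # Boost score if category matches
--             if p_cat and q_cat and p_cat == q_cat:
--                 score += 3
--             if score > best_score:
--                 best_score = score
--                 best_match = qi
--         if best_score > 0:
--             groups[best_match].append(product)
--
--     return groups
-- ===== SOURCE B (Python) =====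
-- def _distribute_products(products: list, queries: list) -> list:
--     """Distribute a flat product list back into groups matching the query order.
--
--     B: phase 1 uses a first-wins dict from normalized query string to its index;
--     phase 2 is a TRANSPOSED sweep (queries outer, remaining products inner) that
--     maintains a running (best_score, best_index) per product; the groups are then
--     assembled by bucketing the tagged products per query index, without mutating
--     group lists during the scans."""
--     exact = {}
--     for i, q in enumerate(queries):
--         k = q.get("query", "").lower().strip()
--         if k not in exact:
--             exact[k] = i
--
--     def tag1(p):
--         pq = (p.get("search_query", "") or "").lower().strip()
--         return exact.get(pq) if pq else None
--
--     tags = [(tag1(p), p) for p in products]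
--     rest = [p for t, p in tags if t is None]
--
--     # query-major sweep: state holds ((p_cat, title), (best_score, best_index)) per product
--     state = [(((p.get("category", "") or "").lower(),
--                (p.get("title", "") or "").lower()), (-1, 0)) for p in rest]
--     for qi, q in enumerate(queries):
--         q_cat = q.get("category", "").lower()
--         words = q.get("query", "").lower().split()
--
--         def step(key, b):
--             score = sum(1 for w in words if w in key[1])
--             if key[0] and q_cat and key[0] == q_cat:
--                 score += 3
--             return (score, qi) if score > b[0] else b
--
--         state = [(key, step(key, b)) for key, b in state]
--     best = [b for _, b in state]
--
--     return [[p for t, p in tags if t == qi]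
--             + [p for p, (s, bi) in zip(rest, best) if s > 0 and bi == qi]
--             for qi in range(len(queries))]
-- ===== Notes on version B (the rewrite author's own statement) =====
-- stated objective: alternative
-- what changed: Phase 1 replaces the per-product scan over queries by a first-wins dict from normalized query string to index; phase 2 transposes the loop nest (queries outer, remaining products inner), maintaining a running (best_score, best_index) cell per product instead of computing each product's scores against all queries in an inner loop; groups are assembled at the end by bucketing tagged products per query index instead of appending to mutable group lists during the scans.
import Mathlib
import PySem

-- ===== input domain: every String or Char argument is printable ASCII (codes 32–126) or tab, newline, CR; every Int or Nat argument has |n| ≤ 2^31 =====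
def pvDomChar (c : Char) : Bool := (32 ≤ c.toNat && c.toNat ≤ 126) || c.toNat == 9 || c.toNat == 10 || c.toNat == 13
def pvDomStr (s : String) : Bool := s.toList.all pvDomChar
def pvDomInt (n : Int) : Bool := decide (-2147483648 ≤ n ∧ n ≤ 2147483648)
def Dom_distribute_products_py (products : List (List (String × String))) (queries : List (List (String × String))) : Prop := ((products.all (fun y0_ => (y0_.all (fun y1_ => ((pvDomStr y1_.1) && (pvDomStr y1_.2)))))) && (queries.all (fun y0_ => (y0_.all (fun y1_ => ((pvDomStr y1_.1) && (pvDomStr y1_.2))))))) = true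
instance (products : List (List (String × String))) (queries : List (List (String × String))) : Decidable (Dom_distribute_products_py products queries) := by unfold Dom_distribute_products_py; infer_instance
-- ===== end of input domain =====

-- B replaces A's per-product query scan (phase 1) by a first-wins dict, transposes phase 2 to a
-- query-major sweep keeping a running (best_score, best_index) per remaining product, and builds
-- the groups by bucketing tagged products per query index instead of mutating group lists.

-- ===== PORT A =====

-- d.get(k, "") on an association-list dict
def pvGet (d : List (String × String)) (k : String) : String :=
  PySem.Dict.getD (PySem.Dict.mk d) k ""

-- A's inner 'for qi, q in enumerate(queries): if pq == qq: break' loop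
def pvFindA : List (List (String × String)) → String → Nat → Option Nat
  | [], _, _ => none
  | q :: qs, pq, qi =>
      if PySem.Str.strip (PySem.Str.lower (pvGet q "query")) = pq then some qi
      else pvFindA qs pq (qi + 1)

-- groups[i].append(x)
def pvAppendAt {α : Type} : List (List α) → Nat → α → List (List α)
  | [], _, _ => []
  | g :: gs, 0, x => (g ++ [x]) :: gs
  | g :: gs, n + 1, x => g :: pvAppendAt gs n x

-- A's phase-2 score of one query against a product's category/title
def pvScoreA (p_cat title : String) (q : List (String × String)) : Int :=
  let q_cat := PySem.Str.lower (pvGet q "category")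
  let words := PySem.Str.split₀ (PySem.Str.lower (pvGet q "query"))
  let score := words.foldl (fun s w => if PySem.Str.isIn w title then s + 1 else s) (0 : Int)
  if p_cat ≠ "" ∧ q_cat ≠ "" ∧ p_cat = q_cat then score + 3 else score

def distribute_products_py (products : List (List (String × String))) (queries : List (List (String × String))) : List (List (List (String × String))) :=
  -- phase 1: groups and unmatched accumulated over the products
  let st := products.foldl (fun st p =>
      let pq := PySem.Str.strip (PySem.Str.lower (pvGet p "search_query"))
      if pq ≠ "" then
        match pvFindA queries pq 0 with
        | some qi => (pvAppendAt st.1 qi p, st.2)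
        | none => (st.1, st.2 ++ [p])
      else (st.1, st.2 ++ [p]))
    (queries.map (fun _ => ([] : List (List (String × String)))), ([] : List (List (String × String))))
  -- phase 2: best-scoring query for each unmatched product
  st.2.foldl (fun groups p =>
      let p_cat := PySem.Str.lower (pvGet p "category")
      let title := PySem.Str.lower (pvGet p "title")
      let best := (queries.zipIdx).foldl (fun b qq =>
          let score := pvScoreA p_cat title qq.1
          if score > b.2 then (qq.2, score) else b) ((0 : Nat), (-1 : Int))
      if best.2 > 0 then pvAppendAt groups best.1 p else groups)
    st.1

-- ===== PORT B =====

-- first-wins dict: normalized query string -> first query index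
def pvExact (queries : List (List (String × String))) : PySem.Dict String Nat :=
  (queries.zipIdx).foldl (fun d qi =>
      let k := PySem.Str.strip (PySem.Str.lower (pvGet qi.1 "query"))
      if d.contains k then d else d.insert k qi.2)
    PySem.Dict.empty

-- B's tag1: exact dict lookup of the normalized search_query (None if falsy/missing)
def pvTag1 (exact : PySem.Dict String Nat) (p : List (String × String)) : Option Nat :=
  let pq := PySem.Str.strip (PySem.Str.lower (pvGet p "search_query"))
  if pq ≠ "" then exact.get? pq else none

-- B's step: update one product's running (best_score, best_index) cell with query qi
def pvStepB (qi : Nat) (q_cat : String) (words : List String) (key : String × String) (b : Int × Nat) : Int × Nat :=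
  let score := words.foldl (fun s w => if PySem.Str.isIn w key.2 then s + 1 else s) (0 : Int)
  let score := if key.1 ≠ "" ∧ q_cat ≠ "" ∧ key.1 = q_cat then score + 3 else score
  if score > b.1 then (score, qi) else b

def distribute_products_py_alt (products : List (List (String × String))) (queries : List (List (String × String))) : List (List (List (String × String))) :=
  let exact := pvExact queries
  let tags := products.map (fun p => (pvTag1 exact p, p))
  let rest := (tags.filter (fun t => t.1 == (none : Option Nat))).map (·.2)
  -- query-major sweep: state holds ((p_cat, title), (best_score, best_index)) per product
  let state0 := rest.map (fun p =>
      ((PySem.Str.lower (pvGet p "category"), PySem.Str.lower (pvGet p "title")), ((-1 : Int), (0 : Nat))))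
  let stateF := (queries.zipIdx).foldl (fun st qq =>
      let q_cat := PySem.Str.lower (pvGet qq.1 "category")
      let words := PySem.Str.split₀ (PySem.Str.lower (pvGet qq.1 "query"))
      st.map (fun kb => (kb.1, pvStepB qq.2 q_cat words kb.1 kb.2))) state0
  let best := stateF.map (·.2)
  (List.range queries.length).map (fun qi =>
    (tags.filter (fun t => t.1 == some qi)).map (·.2)
      ++ ((rest.zip best).filter (fun pb => pb.2.1 > 0 && pb.2.2 == qi)).map (·.1))

-- ===== PRECONDITION & SPEC =====
def Spec_distribute_products_py (products : List (List (String × String))) (queries : List (List (String × String))) (out : List (List (List (String × String)))) : Prop := out = distribute_products_py_alt products queries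
instance (products : List (List (String × String))) (queries : List (List (String × String))) (out : List (List (List (String × String)))) : Decidable (Spec_distribute_products_py products queries out) := by unfold Spec_distribute_products_py; infer_instance

-- ===== CLAIM (what is proved, stated in full; the proofs are below) =====
def Claim_equal_distribute_products_py : Prop := ∀ (products : List (List (String × String))) (queries : List (List (String × String))), Dom_distribute_products_py products queries → Spec_distribute_products_py products queries (distribute_products_py products queries)

-- ===== LEMMAS AND PROOFS =====

-- proof-side view of A's phase-1 decision for one product
def pvAssign1 (queries : List (List (String × String))) (p : List (String × String)) : Option Nat :=
  let pq := PySem.Str.strip (PySem.Str.lower (pvGet p "search_query"))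
  if pq ≠ "" then pvFindA queries pq 0 else none

-- proof-side view of A's phase-2 decision for one product
def pvAssign2 (queries : List (List (String × String))) (p : List (String × String)) : Option Nat :=
  let p_cat := PySem.Str.lower (pvGet p "category")
  let title := PySem.Str.lower (pvGet p "title")
  let best := (queries.zipIdx).foldl (fun b qq =>
      let score := pvScoreA p_cat title qq.1
      if score > b.2 then (qq.2, score) else b) ((0 : Nat), (-1 : Int))
  if best.2 > 0 then some best.1 else none

theorem pvAppendAt_getElem? {α : Type} (g : List (List α)) (i : Nat) (x : α) (j : Nat) :
    (pvAppendAt g i x)[j]? = if j = i then (g[j]?).map (· ++ [x]) else g[j]? := by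
  induction g generalizing i j with
  | nil => simp [pvAppendAt]
  | cons h t ih =>
    cases i with
    | zero => cases j with
      | zero => simp [pvAppendAt]
      | succ j => simp [pvAppendAt]
    | succ i => cases j with
      | zero => simp [pvAppendAt]
      | succ j => simpa [pvAppendAt] using ih i j

theorem pvFoldAppend_getElem? {α : Type} (f : α → Option Nat) (ps : List α)
    (g0 : List (List α)) (qi : Nat) :
    (ps.foldl (fun g p => match f p with | some i => pvAppendAt g i p | none => g) g0)[qi]?
      = (g0[qi]?).map (· ++ (ps.filter (fun p => f p == some qi))) := by
  induction ps generalizing g0 with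
  | nil => simp
  | cons p ps ih =>
    simp only [List.foldl_cons, List.filter_cons]
    rcases hf : f p with _ | i
    · simp [ih]
    · rw [ih, pvAppendAt_getElem?]
      by_cases hj : qi = i
      · subst hj
        simp [Option.map_map, Function.comp_def, List.append_assoc]
      · simp [hj, Ne.symm hj]

theorem pvPhase1_foldl (queries : List (List (String × String)))
    (ps : List (List (String × String))) (g0 : List (List (List (String × String))))
    (u0 : List (List (String × String))) :
    (ps.foldl (fun st p =>
        let pq := PySem.Str.strip (PySem.Str.lower (pvGet p "search_query"))
        if pq ≠ "" then
          match pvFindA queries pq 0 with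
          | some qi => (pvAppendAt st.1 qi p, st.2)
          | none => (st.1, st.2 ++ [p])
        else (st.1, st.2 ++ [p])) (g0, u0))
      = (ps.foldl (fun g p => match pvAssign1 queries p with
            | some i => pvAppendAt g i p | none => g) g0,
         u0 ++ ps.filter (fun p => (pvAssign1 queries p).isNone)) := by
  induction ps generalizing g0 u0 with
  | nil => simp
  | cons p ps ih =>
    rw [List.foldl_cons, List.foldl_cons, List.filter_cons]
    dsimp only
    by_cases hq : PySem.Str.strip (PySem.Str.lower (pvGet p "search_query")) ≠ ""
    · rw [if_pos hq]
      rcases hf : pvFindA queries (PySem.Str.strip (PySem.Str.lower (pvGet p "search_query"))) 0 with _ | i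
      · have ha : pvAssign1 queries p = none := by simp [pvAssign1, hq, hf]
        rw [ha]
        dsimp only
        rw [ih]
        simp
      · have ha : pvAssign1 queries p = some i := by simp [pvAssign1, hq, hf]
        rw [ha]
        dsimp only
        rw [ih]
        simp
    · rw [if_neg hq]
      have ha : pvAssign1 queries p = none := by simp [pvAssign1]; simp at hq; simp [hq]
      rw [ha]
      dsimp only
      rw [ih]
      simp

theorem pvExact_get?_aux (k : String) : ∀ (qs : List (List (String × String))) (i0 : Nat) (d0 : PySem.Dict String Nat),
    ((qs.zipIdx i0).foldl (fun d qi =>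
        let kk := PySem.Str.strip (PySem.Str.lower (pvGet qi.1 "query"))
        if d.contains kk then d else d.insert kk qi.2) d0).get? k
      = (d0.get? k).or (pvFindA qs k i0) := by
  intro qs
  induction qs with
  | nil => intro i0 d0; simp [pvFindA]
  | cons q qs ih =>
    intro i0 d0
    rw [List.zipIdx_cons, List.foldl_cons]
    dsimp only
    by_cases hc : d0.contains (PySem.Str.strip (PySem.Str.lower (pvGet q "query")))
    · rw [if_pos hc, ih]
      simp only [pvFindA]
      by_cases he : PySem.Str.strip (PySem.Str.lower (pvGet q "query")) = k
      · rw [if_pos he]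
        rw [PySem.Dict.contains_eq_isSome_get?] at hc
        rw [← he]
        rcases hg : d0.get? (PySem.Str.strip (PySem.Str.lower (pvGet q "query"))) with _ | v
        · rw [hg] at hc; simp at hc
        · simp [Option.or]
      · rw [if_neg he]
    · rw [if_neg hc, ih]
      simp only [pvFindA]
      by_cases he : PySem.Str.strip (PySem.Str.lower (pvGet q "query")) = k
      · rw [if_pos he]
        rw [PySem.Dict.get?_insert, if_pos he.symm]
        rw [PySem.Dict.contains_eq_isSome_get?] at hc
        rcases hg : d0.get? k with _ | v
        · simp [Option.or]
        · rw [he, hg] at hc; simp at hc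
      · rw [if_neg he]
        rw [PySem.Dict.get?_insert, if_neg (fun h => he h.symm)]

theorem pvExact_get? (queries : List (List (String × String))) (k : String) :
    (pvExact queries).get? k = pvFindA queries k 0 := by
  rw [pvExact, pvExact_get?_aux]
  simp [Option.or]

theorem pvTag1_eq (queries : List (List (String × String))) (p : List (String × String)) :
    pvTag1 (pvExact queries) p = pvAssign1 queries p := by
  simp only [pvTag1, pvAssign1, pvExact_get?]

-- B's per-query step, against A's per-product scoring fold step (transposition core)
theorem pvStepB_eq_score (q : List (String × String)) (key : String × String) (qi : Nat) (b : Int × Nat) :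
    pvStepB qi (PySem.Str.lower (pvGet q "category"))
        (PySem.Str.split₀ (PySem.Str.lower (pvGet q "query"))) key b
      = (if pvScoreA key.1 key.2 q > b.1 then (pvScoreA key.1 key.2 q, qi) else b) := by
  simp only [pvStepB, pvScoreA]

-- A's per-product best fold, as a named value
def pvBestA (queries : List (List (String × String))) (p : List (String × String)) : Nat × Int :=
  (queries.zipIdx).foldl (fun b qq =>
      if pvScoreA (PySem.Str.lower (pvGet p "category")) (PySem.Str.lower (pvGet p "title")) qq.1 > b.2
      then (qq.2, pvScoreA (PySem.Str.lower (pvGet p "category")) (PySem.Str.lower (pvGet p "title")) qq.1)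
      else b) ((0 : Nat), (-1 : Int))

-- swap relation: B's fold with (score, idx) cells = swap of A's fold with (idx, score)
theorem pvFoldB_swap (key : String × String) :
    ∀ (l : List (List (String × String) × Nat)) (j : Nat) (m : Int),
    l.foldl (fun b qq => pvStepB qq.2 (PySem.Str.lower (pvGet qq.1 "category"))
        (PySem.Str.split₀ (PySem.Str.lower (pvGet qq.1 "query"))) key b) (m, j)
      = Prod.swap (l.foldl (fun b qq =>
          if pvScoreA key.1 key.2 qq.1 > b.2 then (qq.2, pvScoreA key.1 key.2 qq.1) else b) (j, m)) := by
  intro l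
  induction l with
  | nil => intro j m; rfl
  | cons qq l ih =>
    intro j m
    rw [List.foldl_cons, List.foldl_cons, pvStepB_eq_score]
    dsimp only
    by_cases h : pvScoreA key.1 key.2 qq.1 > m
    · rw [if_pos h, if_pos h, ih]
    · rw [if_neg h, if_neg h, ih]

-- B's sweep cell for one product = swap of pvBestA
theorem pvCellB (queries : List (List (String × String))) (p : List (String × String)) :
    (queries.zipIdx).foldl (fun b qq => pvStepB qq.2 (PySem.Str.lower (pvGet qq.1 "category"))
        (PySem.Str.split₀ (PySem.Str.lower (pvGet qq.1 "query")))
        (PySem.Str.lower (pvGet p "category"), PySem.Str.lower (pvGet p "title")) b) ((-1 : Int), (0 : Nat))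
      = Prod.swap (pvBestA queries p) := by
  rw [pvFoldB_swap]
  rfl

-- loop interchange: a fold of pointwise maps = a map of pointwise folds
theorem pvFoldl_map_interchange {α β γ : Type} (g : γ → α → β → β) (qs : List γ) (l0 : List (α × β)) :
    qs.foldl (fun st q => st.map (fun kb => (kb.1, g q kb.1 kb.2))) l0
      = l0.map (fun kb => (kb.1, qs.foldl (fun b q => g q kb.1 b) kb.2)) := by
  induction qs generalizing l0 with
  | nil => simp
  | cons q qs ih =>
    rw [List.foldl_cons, ih, List.map_map]
    rfl

-- filtering a zip of a list with a map of itself by a condition on the mapped part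
theorem pvZipMap_filter {α β : Type} (l : List α) (f : α → β) (c : β → Bool) :
    (((l.zip (l.map f)).filter (fun pb => c pb.2)).map (·.1)) = l.filter (fun x => c (f x)) := by
  induction l with
  | nil => rfl
  | cons x xs ih =>
    rw [List.map_cons, List.zip_cons_cons, List.filter_cons, List.filter_cons]
    by_cases h : c (f x)
    · simp only [h, if_pos, List.map_cons, ih]
    · simp only [h, Bool.false_eq_true, if_neg, ih, not_false_eq_true]

-- B's per-product final cell decides membership like pvAssign2
theorem pvCell_eq_assign2 (queries : List (List (String × String))) (p : List (String × String)) (qi : Nat) :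
    (decide ((Prod.swap (pvBestA queries p)).1 > 0) && (Prod.swap (pvBestA queries p)).2 == qi)
      = (pvAssign2 queries p == some qi) := by
  have h2 : pvAssign2 queries p = if (pvBestA queries p).2 > 0 then some (pvBestA queries p).1 else none := by
    simp only [pvAssign2, pvBestA]
  rw [h2]
  rcases pvBestA queries p with ⟨bi, bs⟩
  by_cases hs : bs > 0
  · simp [hs]
  · simp [hs]

-- project the payload out of a tagged, filtered list
theorem pvMapFilterSnd {α β : Type} (l : List α) (f : α → β) (c : β → Bool) :
    ((l.map (fun x => (f x, x))).filter (fun t => c t.1)).map (·.2) = l.filter (fun x => c (f x)) := by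
  induction l with
  | nil => rfl
  | cons x xs ih =>
    rw [List.map_cons, List.filter_cons, List.filter_cons]
    by_cases hc : c (f x)
    · simp only [hc, if_pos, List.map_cons, ih]
    · simp only [hc, Bool.false_eq_true, if_neg, ih, not_false_eq_true]

-- B's groups, entry by entry
set_option maxHeartbeats 1600000 in
theorem pvB_getElem? (products queries : List (List (String × String))) (qi : Nat) :
    (distribute_products_py_alt products queries)[qi]?
      = if qi < queries.length then
          some ((products.filter (fun p => pvAssign1 queries p == some qi))
            ++ ((products.filter (fun p => (pvAssign1 queries p).isNone)).filter
                  (fun p => pvAssign2 queries p == some qi)))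
        else none := by
  simp only [distribute_products_py_alt]
  rw [List.getElem?_map]
  by_cases h : qi < queries.length
  · rw [List.getElem?_range h, if_pos h]
    simp only [Option.map_some, pvTag1_eq]
    rw [pvMapFilterSnd products (fun p => pvAssign1 queries p) (fun t => t == some qi),
        pvMapFilterSnd products (fun p => pvAssign1 queries p) (fun t => t == (none : Option Nat))]
    have hnone : (fun p => (pvAssign1 queries p == (none : Option Nat)))
        = (fun p => (pvAssign1 queries p).isNone) := by
      funext p; rcases pvAssign1 queries p <;> rfl
    rw [hnone]
    refine congrArg some (congrArg₂ (· ++ ·) rfl ?_)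
    rw [pvFoldl_map_interchange, List.map_map, List.map_map]
    simp only [Function.comp_def]
    rw [pvZipMap_filter (products.filter (fun p => (pvAssign1 queries p).isNone))
        (fun p => (queries.zipIdx).foldl (fun b qq =>
          pvStepB qq.2 (PySem.Str.lower (pvGet qq.1 "category"))
            (PySem.Str.split₀ (PySem.Str.lower (pvGet qq.1 "query")))
            (PySem.Str.lower (pvGet p "category"), PySem.Str.lower (pvGet p "title")) b)
          ((-1 : Int), (0 : Nat)))
        (fun r => decide (r.1 > 0) && r.2 == qi)]
    apply List.filter_congr
    intro p _
    rw [pvCellB]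
    exact pvCell_eq_assign2 queries p qi
  · rw [List.getElem?_eq_none (by simpa using h), if_neg h]
    rfl

theorem pvStep2_eq (queries : List (List (String × String))) :
    (fun (groups : List (List (List (String × String)))) p =>
      let p_cat := PySem.Str.lower (pvGet p "category")
      let title := PySem.Str.lower (pvGet p "title")
      let best := (queries.zipIdx).foldl (fun b qq =>
          let score := pvScoreA p_cat title qq.1
          if score > b.2 then (qq.2, score) else b) ((0 : Nat), (-1 : Int))
      if best.2 > 0 then pvAppendAt groups best.1 p else groups)
      = fun g p => match pvAssign2 queries p with | some i => pvAppendAt g i p | none => g := by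
  funext g p
  simp only [pvAssign2]
  by_cases hb : ((queries.zipIdx).foldl (fun b qq =>
      let score := pvScoreA (PySem.Str.lower (pvGet p "category")) (PySem.Str.lower (pvGet p "title")) qq.1
      if score > b.2 then (qq.2, score) else b) ((0 : Nat), (-1 : Int))).2 > 0
  · simp only [if_pos hb]
  · simp only [if_neg hb]

theorem pvA_getElem? (products queries : List (List (String × String))) (qi : Nat) :
    (distribute_products_py products queries)[qi]?
      = (queries[qi]?).map (fun _ =>
          (products.filter (fun p => pvAssign1 queries p == some qi))
            ++ (products.filter (fun p =>
                  pvAssign2 queries p == some qi && (pvAssign1 queries p).isNone))) := by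
  simp only [distribute_products_py]
  rw [pvPhase1_foldl]
  dsimp only
  rw [pvStep2_eq, pvFoldAppend_getElem?, pvFoldAppend_getElem?]
  simp only [List.map_const', Option.map_map, Function.comp_def]
  by_cases h : qi < queries.length
  · rw [List.getElem?_replicate, if_pos h, List.getElem?_eq_getElem h]
    simp
  · rw [List.getElem?_replicate, if_neg h, List.getElem?_eq_none (by omega)]
    rfl

-- ===== VERDICT (by name: the statement is the Claim_ definition above) =====
theorem distribute_products_py_spec : Claim_equal_distribute_products_py := by
  intro products queries _
  unfold Spec_distribute_products_py
  apply List.ext_getElem?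
  intro qi
  rw [pvA_getElem?, pvB_getElem?]
  by_cases h : qi < queries.length
  · rw [if_pos h, List.getElem?_eq_getElem h]
    simp only [Option.map_some]
    refine congrArg some (congrArg₂ (· ++ ·) rfl ?_)
    rw [List.filter_filter]
  · rw [if_neg h, List.getElem?_eq_none (by omega)]
    rfl
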